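-- pv_equiv track=rewrite | github.com/Leeleo3x/IMUProject | code/python/wifi_localization/wifi_localization.py | build_bssid_map
-- ===== SOURCE A (Python) =====
-- def build_bssid_map(wifi_records, min_count=5):
--     bssid_count = {}
--     for scan in wifi_records:
--         for rec in scan:
--             if rec['BSSID'] not in bssid_count:
--                 bssid_count[rec['BSSID']] = 1
--             else:
--                 bssid_count[rec['BSSID']] += 1
--     bssid_map = {}
--     ind = 0
--     for scan in wifi_records:
--         for rec in scan:
--             if bssid_count[rec['BSSID']] < min_count:
--                 continue
--             elif rec['BSSID'] not in bssid_map: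
--                 bssid_map[rec['BSSID']] = ind
--                 ind += 1
--     return bssid_map
-- ===== SOURCE B (Python) =====
-- def build_bssid_map(wifi_records, min_count=5):
--     count = {}
--     for scan in wifi_records:
--         for rec in scan:
--             b = rec['BSSID']
--             count[b] = count.get(b, 0) + 1
--     keep = [b for b in count if count[b] >= min_count]
--     return {b: i for i, b in enumerate(keep)}
-- ===== Notes on version B (the rewrite author's own statement) =====
-- stated objective: simpler
-- what changed: A's second full nested scan over all wifi records (skipping already-indexed BSSIDs) is replaced by one flat pass over the count dict's keys, which are already the distinct BSSIDs in first-occurrence order, filtered by min_count and enumerated.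
import Mathlib
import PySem

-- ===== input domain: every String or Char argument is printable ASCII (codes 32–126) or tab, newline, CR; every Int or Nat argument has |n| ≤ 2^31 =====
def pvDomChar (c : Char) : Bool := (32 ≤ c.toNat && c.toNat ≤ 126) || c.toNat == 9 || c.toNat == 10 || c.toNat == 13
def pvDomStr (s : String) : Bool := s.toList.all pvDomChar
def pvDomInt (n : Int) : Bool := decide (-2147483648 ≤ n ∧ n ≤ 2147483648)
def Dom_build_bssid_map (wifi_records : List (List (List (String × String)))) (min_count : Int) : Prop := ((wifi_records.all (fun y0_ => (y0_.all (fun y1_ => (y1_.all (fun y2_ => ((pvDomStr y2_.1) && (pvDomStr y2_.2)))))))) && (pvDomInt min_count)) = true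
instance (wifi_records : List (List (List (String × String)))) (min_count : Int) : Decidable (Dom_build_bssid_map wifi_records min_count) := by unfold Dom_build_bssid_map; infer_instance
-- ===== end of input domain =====

-- B replaces A's second full scan of all records by a single flat pass over the
-- count dict's keys (first-occurrence order) — objective: simpler.

-- ===== PORT A =====
-- rec['BSSID'] (Pre_ guarantees the key is present; the .getD "" default is never used inside Pre_)
def pvKey (rec : List (String × String)) : String :=
  ((PySem.Dict.ofList rec).get? "BSSID").getD ""

def build_bssid_map (wifi_records : List (List (List (String × String)))) (min_count : Int) : List (String × Int) :=
  let bssid_count : PySem.Dict String Int :=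
    wifi_records.foldl (fun d scan =>
      scan.foldl (fun d rec =>
        let b := pvKey rec
        if d.contains b = false then d.insert b 1
        else d.insert b (d.getD b 0 + 1)) d) PySem.Dict.empty
  let st : PySem.Dict String Int × Int :=
    wifi_records.foldl (fun st scan =>
      scan.foldl (fun st rec =>
        let b := pvKey rec
        if bssid_count.getD b 0 < min_count then st
        else if st.1.contains b = false then (st.1.insert b st.2, st.2 + 1)
        else st) st) (PySem.Dict.empty, 0)
  st.1.items

-- ===== PORT B =====
-- enumerate(keep) consumed as (key, index) insertions
def pvEnum (i : Int) : List String → List (String × Int)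
  | [] => []
  | b :: bs => (b, i) :: pvEnum (i + 1) bs

def build_bssid_map_alt (wifi_records : List (List (List (String × String)))) (min_count : Int) : List (String × Int) :=
  let count : PySem.Dict String Int :=
    wifi_records.foldl (fun d scan =>
      scan.foldl (fun d rec =>
        let b := pvKey rec
        d.insert b (d.getD b 0 + 1)) d) PySem.Dict.empty
  let keep := count.keys.filter (fun b => decide (min_count ≤ count.getD b 0))
  let m : PySem.Dict String Int :=
    (pvEnum 0 keep).foldl (fun d p => d.insert p.1 p.2) PySem.Dict.empty
  m.items

-- ===== PRECONDITION & SPEC =====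
-- Pre_: every record dict carries the key "BSSID" (Python A raises KeyError otherwise)
def Pre_build_bssid_map (wifi_records : List (List (List (String × String)))) (min_count : Int) : Prop :=
  (wifi_records.all (fun scan => scan.all (fun rec => (PySem.Dict.ofList rec).contains "BSSID"))) = true
instance (wifi_records : List (List (List (String × String)))) (min_count : Int) : Decidable (Pre_build_bssid_map wifi_records min_count) := by unfold Pre_build_bssid_map; infer_instance
def pvWitness_build_bssid_map : (List (List (List (String × String)))) × Int :=
  ([[[("BSSID", "aa")], [("BSSID", "bb")]], [[("BSSID", "aa")]]], 2)

def Spec_build_bssid_map (wifi_records : List (List (List (String × String)))) (min_count : Int) (out : List (String × Int)) : Prop := out = build_bssid_map_alt wifi_records min_count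
instance (wifi_records : List (List (List (String × String)))) (min_count : Int) (out : List (String × Int)) : Decidable (Spec_build_bssid_map wifi_records min_count out) := by unfold Spec_build_bssid_map; infer_instance

-- ===== CLAIM (what is proved, stated in full; the proofs are below) =====
def Claim_equal_build_bssid_map : Prop := ∀ (wifi_records : List (List (List (String × String)))) (min_count : Int), Dom_build_bssid_map wifi_records min_count → Pre_build_bssid_map wifi_records min_count → Spec_build_bssid_map wifi_records min_count (build_bssid_map wifi_records min_count)

-- ===== LEMMAS AND PROOFS =====

-- the flat stream of BSSID keys both programs traverse
def pvStream (wifi_records : List (List (List (String × String)))) : List String :=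
  wifi_records.flatMap (fun scan => scan.map pvKey)

lemma foldl_nested {σ : Type} (g : σ → String → σ) :
    ∀ (wr : List (List (List (String × String)))) (init : σ),
      wr.foldl (fun d scan => scan.foldl (fun d rec => g d (pvKey rec)) d) init
        = (pvStream wr).foldl g init := by
  intro wr
  induction wr with
  | nil => intro init; rfl
  | cons scan rest ih =>
      intro init
      simp only [pvStream, List.flatMap_cons, List.foldl_append, List.foldl_cons, List.foldl_map]
      rw [ih]
      rfl

-- the state-skipping second loop of A, abstracted over the qualifying test q
def selp (q : String → Bool) (seen : List String) : List String → List String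
  | [] => []
  | b :: s =>
      if b ∈ seen then selp q seen s
      else if q b then b :: selp q (seen ++ [b]) s
      else selp q (seen ++ [b]) s

lemma pvEnum_append (i : Int) (ks : List String) (b : String) :
    pvEnum i (ks ++ [b]) = pvEnum i ks ++ [(b, i + ks.length)] := by
  induction ks generalizing i with
  | nil => simp [pvEnum]
  | cons a ks ih =>
      simp only [List.cons_append, pvEnum, ih]
      have h : i + 1 + (ks.length : Int) = i + ((a :: ks).length : Int) := by
        push_cast [List.length_cons]; ring
      rw [h]

lemma pvEnum_map_fst (i : Int) (ks : List String) :
    (pvEnum i ks).map Prod.fst = ks := by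
  induction ks generalizing i with
  | nil => rfl
  | cons a ks ih => simp [pvEnum, ih]

lemma contains_pvEnum (i : Int) (ks : List String) (b : String) :
    (PySem.Dict.mk (pvEnum i ks)).contains b = decide (b ∈ ks) := by
  induction ks generalizing i with
  | nil => simp [pvEnum, PySem.Dict.contains_mk]
  | cons a ks ih =>
      have := ih (i + 1)
      simp [pvEnum, PySem.Dict.contains_mk] at this ⊢
      by_cases h : a = b
      · simp [h, this]
      · have h' : ¬ b = a := fun hh => h hh.symm
        simp [h, h', this]

lemma loopA_items (q : String → Bool) :
    ∀ (s ks seen : List String) (i0 : Int),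
      ks.Nodup →
      (∀ b, b ∈ ks ↔ (b ∈ seen ∧ q b = true)) →
      ((s.foldl (fun st b =>
          if q b = true then
            (if st.1.contains b = false then (st.1.insert b st.2, st.2 + 1) else st)
          else st)
        (PySem.Dict.mk (pvEnum i0 ks), i0 + (ks.length : Int))).1).items
        = pvEnum i0 ks ++ pvEnum (i0 + (ks.length : Int)) (selp q seen s) := by
  intro s
  induction s with
  | nil => intro ks seen i0 hnd hinv; simp [selp, pvEnum]
  | cons b s ih =>
      intro ks seen i0 hnd hinv
      rw [List.foldl_cons]
      by_cases hq : q b = true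
      · rw [if_pos hq]
        by_cases hseen : b ∈ seen
        · have hks : b ∈ ks := (hinv b).mpr ⟨hseen, hq⟩
          have hc : (PySem.Dict.mk (pvEnum i0 ks)).contains b = true := by
            rw [contains_pvEnum]; simpa using hks
          rw [show selp q seen (b :: s) = selp q seen s from by simp [selp, hseen]]
          rw [hc, if_neg (by simp : ¬ ((true : Bool) = false))]
          exact ih ks seen i0 hnd hinv
        · have hks : b ∉ ks := fun h => hseen ((hinv b).mp h).1
          have hc : (PySem.Dict.mk (pvEnum i0 ks)).contains b = false := by
            rw [contains_pvEnum]; simpa using hks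
          rw [hc, if_pos (rfl : (false : Bool) = false)]
          have hins :
              ((PySem.Dict.mk (pvEnum i0 ks)).insert b (i0 + (ks.length : Int)))
                = PySem.Dict.mk (pvEnum i0 (ks ++ [b])) := by
            apply PySem.Dict.ext
            rw [PySem.Dict.items_insert_of_not_contains _ _ hc, pvEnum_append]
          have hnd' : (ks ++ [b]).Nodup :=
            List.Nodup.append hnd (List.nodup_singleton b)
              (by intro a ha hb; simp only [List.mem_singleton] at hb; exact hks (hb ▸ ha))
          have hinv' : ∀ b', b' ∈ ks ++ [b] ↔ (b' ∈ seen ++ [b] ∧ q b' = true) := by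
            intro b'
            by_cases hb : b' = b
            · subst hb; simp [hq]
            · simp only [List.mem_append, List.mem_singleton, hb, or_false]
              exact hinv b'
          have harith : i0 + (ks.length : Int) + 1 = i0 + (((ks ++ [b]).length : Nat) : Int) := by
            push_cast [List.length_append, List.length_cons, List.length_nil]; ring
          have hrec := ih (ks ++ [b]) (seen ++ [b]) i0 hnd' hinv'
          rw [hins, harith]
          rw [hrec]
          rw [show selp q seen (b :: s) = b :: selp q (seen ++ [b]) s from by
            simp [selp, hseen, hq]]
          rw [pvEnum_append]
          show pvEnum i0 ks ++ [(b, i0 + (ks.length : Int))] ++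
              pvEnum (i0 + (((ks ++ [b]).length : Nat) : Int)) (selp q (seen ++ [b]) s) = _
          rw [show pvEnum (i0 + (ks.length : Int)) (b :: selp q (seen ++ [b]) s)
              = (b, i0 + (ks.length : Int)) ::
                pvEnum (i0 + (ks.length : Int) + 1) (selp q (seen ++ [b]) s) from rfl]
          rw [harith, List.append_assoc]
          rfl
      · rw [if_neg hq]
        by_cases hseen : b ∈ seen
        · rw [show selp q seen (b :: s) = selp q seen s from by simp [selp, hseen]]
          exact ih ks seen i0 hnd hinv
        · rw [show selp q seen (b :: s) = selp q (seen ++ [b]) s from by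
            simp [selp, hseen, hq]]
          apply ih ks (seen ++ [b]) i0 hnd
          intro b'
          by_cases hb : b' = b
          · subst hb
            constructor
            · intro h; exact absurd ((hinv b').mp h).1 hseen
            · rintro ⟨-, hqb⟩; exact absurd hqb hq
          · simp only [List.mem_append, List.mem_singleton, hb, or_false]
            exact hinv b'

lemma selp_eq_filter (q : String → Bool) :
    ∀ (s seen : List String),
      selp q seen s = (PySem.Set.ofList s).filter (fun b => q b && !(decide (b ∈ seen))) := by
  intro s
  induction s with
  | nil => intro seen; rfl
  | cons b s ih =>
      intro seen
      rw [PySem.Set.ofList_cons, List.filter_cons]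
      by_cases hseen : b ∈ seen
      · rw [show (q b && !(decide (b ∈ seen))) = false from by simp [hseen]]
        simp only [Bool.false_eq_true, if_false]
        rw [show selp q seen (b :: s) = selp q seen s from by simp [selp, hseen]]
        rw [ih seen, PySem.Set.discard, List.filter_filter]
        apply List.filter_congr
        intro x _
        by_cases hx : x = b
        · subst hx; simp [hseen]
        · simp [hx]
      · have key : ∀ x, (q x && !(decide (x ∈ seen ++ [b]))) =
            ((q x && !(decide (x ∈ seen))) && !(x == b)) := by
          intro x
          by_cases hx : x = b
          · subst hx; simp
          · simp only [List.mem_append, List.mem_singleton, hx, or_false]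
            by_cases hxs : x ∈ seen <;> simp [hxs, hx]
        by_cases hq : q b = true
        · rw [show (q b && !(decide (b ∈ seen))) = true from by simp [hseen, hq]]
          simp only [if_true]
          rw [show selp q seen (b :: s) = b :: selp q (seen ++ [b]) s from by
            simp [selp, hseen, hq]]
          rw [ih (seen ++ [b]), PySem.Set.discard, List.filter_filter]
          congr 1
          apply List.filter_congr
          intro x _
          rw [key x]
        · rw [show (q b && !(decide (b ∈ seen))) = false from by simp [hq]]
          simp only [Bool.false_eq_true, if_false]
          rw [show selp q seen (b :: s) = selp q (seen ++ [b]) s from by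
            simp [selp, hseen, hq]]
          rw [ih (seen ++ [b]), PySem.Set.discard, List.filter_filter]
          apply List.filter_congr
          intro x _
          rw [key x]

-- ===== VERDICT (by name: the statement is the Claim_ definition above) =====
theorem build_bssid_map_spec : Claim_equal_build_bssid_map := by
  intro wr mc _ _
  unfold Spec_build_bssid_map
  simp only [build_bssid_map, build_bssid_map_alt]
  have hstep : (fun (d : PySem.Dict String Int) (b : String) =>
      if d.contains b = false then d.insert b 1 else d.insert b (d.getD b 0 + 1))
      = (fun (d : PySem.Dict String Int) (b : String) => d.insert b (d.getD b 0 + 1)) := by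
    funext d b
    by_cases h : d.contains b = false
    · rw [if_pos h, PySem.Dict.getD_of_not_contains _ _ h]
      norm_num
    · rw [if_neg h]
  have hcountA :
      (wr.foldl (fun d scan => scan.foldl (fun d rec =>
          if d.contains (pvKey rec) = false then d.insert (pvKey rec) 1
          else d.insert (pvKey rec) (d.getD (pvKey rec) 0 + 1)) d) PySem.Dict.empty)
        = PySem.Dict.counter (pvStream wr) := by
    refine (foldl_nested (fun (d : PySem.Dict String Int) (b : String) =>
        if d.contains b = false then d.insert b 1
        else d.insert b (d.getD b 0 + 1)) wr PySem.Dict.empty).trans ?_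
    rw [hstep]
    exact PySem.Dict.foldl_insert_getD_add_one_eq_counter _
  have hcountB :
      (wr.foldl (fun d scan => scan.foldl (fun d rec =>
          d.insert (pvKey rec) (d.getD (pvKey rec) 0 + 1)) d) PySem.Dict.empty)
        = PySem.Dict.counter (pvStream wr) := by
    refine (foldl_nested (fun (d : PySem.Dict String Int) (b : String) =>
        d.insert b (d.getD b 0 + 1)) wr PySem.Dict.empty).trans ?_
    exact PySem.Dict.foldl_insert_getD_add_one_eq_counter _
  rw [hcountA, hcountB]
  set s := pvStream wr with hs
  set q : String → Bool := fun b => decide (mc ≤ ((s.count b : Nat) : Int)) with hqdef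
  have hstep2 : (fun (st : PySem.Dict String Int × Int) (b : String) =>
      if (PySem.Dict.counter s).getD b 0 < mc then st
      else if st.1.contains b = false then (st.1.insert b st.2, st.2 + 1) else st)
      = (fun (st : PySem.Dict String Int × Int) (b : String) =>
        if q b = true then
          (if st.1.contains b = false then (st.1.insert b st.2, st.2 + 1) else st)
        else st) := by
    funext st b
    rw [PySem.Dict.getD_counter]
    by_cases h : ((s.count b : Nat) : Int) < mc
    · have hqb : q b = false := by
        simp only [hqdef, decide_eq_false_iff_not]
        exact not_le.mpr h
      rw [if_pos h, hqb, if_neg (by simp : ¬ ((false : Bool) = true))]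
    · have hqb : q b = true := by
        simp only [hqdef, decide_eq_true_eq]
        exact not_lt.mp h
      rw [if_neg h, hqb, if_pos (rfl : (true : Bool) = true)]
  have hA :
      (wr.foldl (fun st scan => scan.foldl (fun st rec =>
          if (PySem.Dict.counter s).getD (pvKey rec) 0 < mc then st
          else if st.1.contains (pvKey rec) = false then (st.1.insert (pvKey rec) st.2, st.2 + 1)
          else st) st) ((PySem.Dict.empty : PySem.Dict String Int), (0 : Int))).1.items
        = pvEnum 0 ((PySem.Set.ofList s).filter q) := by
    refine (congrArg (fun z => (Prod.fst z).items)
      ((foldl_nested (σ := PySem.Dict String Int × Int)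
        (fun st b =>
          if (PySem.Dict.counter s).getD b 0 < mc then st
          else if st.1.contains b = false then (st.1.insert b st.2, st.2 + 1)
          else st) wr (PySem.Dict.empty, 0)))).trans ?_
    rw [hstep2]
    have h0 := loopA_items q s [] [] 0 (by simp) (by simp)
    simp only [pvEnum, List.length_nil, Nat.cast_zero, add_zero, List.nil_append] at h0
    rw [show (PySem.Dict.mk ([] : List (String × Int))) = PySem.Dict.empty from rfl] at h0
    rw [← hs]
    rw [h0, selp_eq_filter]
    apply congrArg
    apply List.filter_congr
    intro x _
    simp
  rw [hA]
  rw [PySem.Dict.keys_counter]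
  have hkeep : (PySem.Set.ofList s).filter
      (fun b => decide (mc ≤ (PySem.Dict.counter s).getD b 0))
      = (PySem.Set.ofList s).filter q := by
    apply List.filter_congr
    intro x _
    rw [PySem.Dict.getD_counter]
  rw [hkeep]
  have hnd : ((PySem.Set.ofList s).filter q).Nodup := (PySem.Set.nodup_ofList s).filter _
  rw [PySem.Dict.items_foldl_insert_fresh (pvEnum 0 ((PySem.Set.ofList s).filter q))
      Prod.fst Prod.snd PySem.Dict.empty
      (by intro a _; simp [PySem.Dict.contains_empty])
      (by rw [pvEnum_map_fst]; exact hnd)]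
  simp [PySem.Dict.empty]
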